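-- pv_equiv track=rewrite | github.com/sWizad/TensoRF | models/SparseHashMLP.py | get_weight_pattern
-- ===== SOURCE A (Python) =====
-- def get_weight_pattern(weight_count):
--     MAX_LEVEL = 32
--     LATENT_SHAPE = [8,4,2,1]
--     pattern = []
--     i = MAX_LEVEL
--     while weight_count > 0 and i > 0:
--         jcnt = 0
--         while jcnt < len(LATENT_SHAPE):
--             j = LATENT_SHAPE[jcnt]
--             if weight_count >= i*j:
--                 pattern.append([i,j])
--                 weight_count -= i*j
--                 continue
--             jcnt += 1
--         i -= 1
--     return pattern
-- ===== SOURCE B (Python) =====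
-- def get_weight_pattern(weight_count):
--     pattern = []
--     for i in range(32, 0, -1):
--         if weight_count <= 0:
--             break
--         for j in [8, 4, 2, 1]:
--             cnt = weight_count // (i * j)
--             pattern.extend([[i, j]] * cnt)
--             weight_count -= cnt * i * j
--     return pattern
-- ===== Notes on version B (the rewrite author's own statement) =====
-- stated objective: faster
-- what changed: Replaced the innermost count-by-repeated-subtraction loop (Python `continue` re-testing the same j) with a single floor-division per (i,j) pair that appends all copies at once.
import Mathlib
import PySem

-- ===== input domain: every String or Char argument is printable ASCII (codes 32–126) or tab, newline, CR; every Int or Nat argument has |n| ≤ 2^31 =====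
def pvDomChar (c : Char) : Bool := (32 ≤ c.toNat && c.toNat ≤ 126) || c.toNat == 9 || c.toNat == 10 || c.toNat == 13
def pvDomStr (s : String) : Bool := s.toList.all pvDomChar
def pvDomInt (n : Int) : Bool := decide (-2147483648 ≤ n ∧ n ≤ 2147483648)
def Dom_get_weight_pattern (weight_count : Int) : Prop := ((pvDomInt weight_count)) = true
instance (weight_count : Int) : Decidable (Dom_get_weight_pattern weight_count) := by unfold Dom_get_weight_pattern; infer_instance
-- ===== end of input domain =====

-- B replaces A's innermost count-by-repeated-subtraction loop with a single floor division
-- per (i,j) pair (objective: faster — O(1) arithmetic per pair instead of O(weight_count/(i*j)) subtractions).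

-- ===== PORT A =====
-- Inner while over jcnt with Python's `continue` re-testing the same j; the hypothesis
-- argument `hi` only justifies termination (i ≥ 1 holds at every call site) and carries no data.
def innerA (wc i : Int) (hi : 1 ≤ i) (jcnt : Nat) (acc : List (List Int)) :
    Int × List (List Int) :=
  if h : jcnt < 4 then
    let j := ([8, 4, 2, 1] : List Int).getD jcnt 0
    if hw : i * j ≤ wc then
      innerA (wc - i * j) i hi jcnt (acc ++ [[i, j]])
    else
      innerA wc i hi (jcnt + 1) acc
  else (wc, acc)
termination_by wc.toNat * 5 + (4 - jcnt)
decreasing_by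
  · have hj : (1 : Int) ≤ ([8, 4, 2, 1] : List Int).getD jcnt 0 := by
      interval_cases jcnt <;> simp
    have hd : (1 : Int) ≤ i * ([8, 4, 2, 1] : List Int).getD jcnt 0 := by
      have := mul_le_mul hi hj (by omega) (by omega)
      simpa using this
    have _hw' : i * ([8, 4, 2, 1] : List Int).getD jcnt 0 ≤ wc := hw
    simp only [j] at *
    omega
  · omega

def outerA (wc : Int) (i : Nat) (acc : List (List Int)) : List (List Int) :=
  match i with
  | 0 => acc
  | i' + 1 =>
    if 0 < wc then
      let r := innerA wc (i' + 1 : Nat) (by exact_mod_cast Nat.succ_le_succ (Nat.zero_le i')) 0 acc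
      outerA r.1 i' r.2
    else acc

def get_weight_pattern (weight_count : Int) : List (List Int) :=
  outerA weight_count 32 []

-- ===== PORT B =====
def innerB (wc i : Int) (js : List Int) (acc : List (List Int)) : Int × List (List Int) :=
  match js with
  | [] => (wc, acc)
  | j :: rest =>
    let cnt := PySem.Int.floordiv wc (i * j)
    innerB (wc - cnt * i * j) i rest (acc ++ List.replicate cnt.toNat [i, j])

def outerB (wc : Int) (i : Nat) (acc : List (List Int)) : List (List Int) :=
  match i with
  | 0 => acc
  | i' + 1 =>
    if wc ≤ 0 then acc
    else
      let r := innerB wc (i' + 1 : Nat) [8, 4, 2, 1] acc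
      outerB r.1 i' r.2

def get_weight_pattern_alt (weight_count : Int) : List (List Int) :=
  outerB weight_count 32 []

-- ===== PRECONDITION & SPEC =====
def Spec_get_weight_pattern (weight_count : Int) (out : List (List Int)) : Prop := out = get_weight_pattern_alt weight_count
instance (weight_count : Int) (out : List (List Int)) : Decidable (Spec_get_weight_pattern weight_count out) := by unfold Spec_get_weight_pattern; infer_instance

-- ===== CLAIM (what is proved, stated in full; the proofs are below) =====
def Claim_equal_get_weight_pattern : Prop := ∀ (weight_count : Int), Dom_get_weight_pattern weight_count → Spec_get_weight_pattern weight_count (get_weight_pattern weight_count)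

-- ===== LEMMAS AND PROOFS =====

-- One j-stage of A's inner loop: repeated subtraction of d = i*j equals floor division.
theorem innerA_stage (wc i : Int) (hi : 1 ≤ i) (jcnt : Nat) (hj4 : jcnt < 4)
    (acc : List (List Int)) (hw : 0 ≤ wc) :
    innerA wc i hi jcnt acc =
      innerA (wc % (i * ([8,4,2,1] : List Int).getD jcnt 0)) i hi (jcnt + 1)
        (acc ++ List.replicate ((wc / (i * ([8,4,2,1] : List Int).getD jcnt 0)).toNat)
          [i, ([8,4,2,1] : List Int).getD jcnt 0]) := by
  set j := ([8,4,2,1] : List Int).getD jcnt 0 with hjdef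
  have hj : (1 : Int) ≤ j := by
    rw [hjdef]; interval_cases jcnt <;> simp
  have hd : (1 : Int) ≤ i * j := by
    have := mul_le_mul hi hj (by omega) (by omega); simpa using this
  induction hn : wc.toNat using Nat.strong_induction_on generalizing wc acc with
  | _ n ih =>
    rw [innerA]
    simp only [hj4, dif_pos, ← hjdef]
    by_cases hsub : i * j ≤ wc
    · rw [dif_pos hsub]
      have hrec := ih ((wc - i*j).toNat) (by omega) (wc - i*j) (acc ++ [[i,j]]) (by omega) rfl
      rw [hrec]
      have hq : 1 ≤ wc / (i * j) := by
        rw [Int.le_ediv_iff_mul_le (by omega)]; omega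
      have hmod : (wc - i*j) % (i*j) = wc % (i*j) := by
        rw [show wc - i*j = wc + (i*j) * (-1) by ring, Int.add_mul_emod_self_left]
      have hdiv : (wc - i*j) / (i*j) = wc / (i*j) - 1 := by
        rw [show wc - i*j = wc + (-1) * (i*j) by ring,
          Int.add_mul_ediv_right _ _ (by omega : i*j ≠ 0)]; ring
      rw [hmod, hdiv]
      congr 1
      have hnat : (wc / (i*j) - 1).toNat = (wc / (i*j)).toNat - 1 := by omega
      rw [hnat]
      rw [List.append_assoc]
      congr 1
      have : (wc / (i*j)).toNat = ((wc / (i*j)).toNat - 1) + 1 := by omega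
      rw [this, List.replicate_succ]
      simp
    · rw [dif_neg hsub]
      have hq0 : wc / (i * j) = 0 := by
        apply Int.ediv_eq_zero_of_lt hw; omega
      have hm : wc % (i * j) = wc := by
        apply Int.emod_eq_of_lt hw; omega
      rw [hq0, hm]; simp

theorem inner_eq (wc i : Int) (hi : 1 ≤ i) (acc : List (List Int)) (hw : 0 ≤ wc) :
    innerA wc i hi 0 acc = innerB wc i [8,4,2,1] acc := by
  have e8 : (([8,4,2,1] : List Int).getD 0 0) = 8 := by simp
  have e4 : (([8,4,2,1] : List Int).getD 1 0) = 4 := by simp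
  have e2 : (([8,4,2,1] : List Int).getD 2 0) = 2 := by simp
  have e1 : (([8,4,2,1] : List Int).getD 3 0) = 1 := by simp
  have hpos : ∀ j : Int, 1 ≤ j → 0 < i * j := by
    intro j hj
    have := mul_le_mul hi hj (by omega) (by omega); simpa using this
  have fd : ∀ (a j : Int), 1 ≤ j → PySem.Int.floordiv a (i * j) = a / (i * j) := by
    intro a j hj; exact PySem.Int.floordiv_eq_ediv_of_pos (hpos j hj)
  rw [innerA_stage wc i hi 0 (by omega) acc hw, e8]
  rw [innerA_stage _ i hi 1 (by omega) _ (Int.emod_nonneg wc (by have := hpos 8 (by norm_num); omega)), e4]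
  rw [innerA_stage _ i hi 2 (by omega) _ (Int.emod_nonneg _ (by have := hpos 4 (by norm_num); omega)), e2]
  rw [innerA_stage _ i hi 3 (by omega) _ (Int.emod_nonneg _ (by have := hpos 2 (by norm_num); omega)), e1]
  rw [innerA, dif_neg (by omega : ¬ (3 + 1 < 4))]
  simp only [innerB, fd _ 8 (by norm_num), fd _ 4 (by norm_num), fd _ 2 (by norm_num),
    fd _ 1 (by norm_num)]
  have key : ∀ (x c : Int), x - x / (i * c) * i * c = x % (i * c) := by
    intro x c; rw [Int.emod_def]; ring
  rw [key wc 8, key (wc % (i * 8)) 4, key (wc % (i * 8) % (i * 4)) 2,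
    key (wc % (i * 8) % (i * 4) % (i * 2)) 1]

theorem outer_eq (i : Nat) : ∀ (wc : Int) (acc : List (List Int)),
    outerA wc i acc = outerB wc i acc := by
  induction i with
  | zero => intro wc acc; rfl
  | succ i' ih =>
    intro wc acc
    rw [outerA, outerB]
    by_cases hw : 0 < wc
    · rw [if_pos hw, if_neg (by omega)]
      rw [inner_eq wc _ _ acc (by omega)]
      exact ih _ _
    · rw [if_neg hw, if_pos (by omega)]

-- ===== VERDICT (by name: the statement is the Claim_ definition above) =====
theorem get_weight_pattern_spec : Claim_equal_get_weight_pattern := by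
  intro wc _
  unfold Spec_get_weight_pattern get_weight_pattern get_weight_pattern_alt
  exact outer_eq 32 wc []
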